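-- pv_equiv track=rewrite | github.com/ccctw-ma/leetcode | src/Match/match301-310/307.py | minNumberOfHours
-- ===== SOURCE A (Python) =====
-- from typing import List, Optional
--
-- def minNumberOfHours(initialEnergy: int, initialExperience: int, energy: List[int],
--                      experience: List[int]) -> int:
--     es = sum(energy)
--     a = max(0, 1 + es - initialEnergy)
--     b = 0
--     for e in experience:
--         if initialExperience > e:
--             initialExperience += e
--         else:
--             add = (e - initialExperience + 1)
--             b += add
--             initialExperience += add
--             initialExperience += e
--     return a + b
-- ===== SOURCE B (Python) =====
-- def minNumberOfHours(initialEnergy, initialExperience, energy, experience):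
--     total = initialExperience + sum(experience)
--     need = 0
--     for e in reversed(experience):
--         total -= e
--         need = max(e + 1 - total, need)
--     return max(0, 1 + sum(energy) - initialEnergy) + need
-- ===== Notes on version B (the rewrite author's own statement) =====
-- stated objective: alternative
-- what changed: Replaces the forward branching greedy that mutates a running trained experience with a backward sweep: sum experience once, then walk the list in reverse subtracting each element to recover the prefix before it and keep the maximum deficit e+1-prefix, added once at the end.
import Mathlib
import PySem

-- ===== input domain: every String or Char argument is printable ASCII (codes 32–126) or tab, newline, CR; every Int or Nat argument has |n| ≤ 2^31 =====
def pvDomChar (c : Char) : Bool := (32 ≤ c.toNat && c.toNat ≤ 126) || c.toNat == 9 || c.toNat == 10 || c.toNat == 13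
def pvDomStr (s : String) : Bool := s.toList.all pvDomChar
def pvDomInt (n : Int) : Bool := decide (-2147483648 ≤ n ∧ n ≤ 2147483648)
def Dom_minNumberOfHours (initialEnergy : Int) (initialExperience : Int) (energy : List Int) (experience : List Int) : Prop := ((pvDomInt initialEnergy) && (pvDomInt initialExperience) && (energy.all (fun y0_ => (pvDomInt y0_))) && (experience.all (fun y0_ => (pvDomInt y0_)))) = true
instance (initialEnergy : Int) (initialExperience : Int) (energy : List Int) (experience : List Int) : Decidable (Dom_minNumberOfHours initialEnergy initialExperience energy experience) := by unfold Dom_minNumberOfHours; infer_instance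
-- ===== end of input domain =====

-- ===== PORT A =====
-- B replaces the forward branching greedy (running trained experience) with a backward sweep
-- over the experience list recovering each prefix by subtraction and taking the max deficit
-- (objective: alternative decomposition, same cost).
def minNumberOfHours (initialEnergy : Int) (initialExperience : Int) (energy : List Int) (experience : List Int) : Int :=
  let es := energy.foldl (· + ·) 0
  let a := max 0 (1 + es - initialEnergy)
  let st := experience.foldl (fun (s : Int × Int) e =>
    if s.1 > e then (s.1 + e, s.2)
    else
      let add := e - s.1 + 1
      (s.1 + add + e, s.2 + add)) (initialExperience, 0)
  a + st.2

-- ===== PORT B =====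
def minNumberOfHours_alt (initialEnergy : Int) (initialExperience : Int) (energy : List Int) (experience : List Int) : Int :=
  let total := initialExperience + experience.foldl (· + ·) 0
  let st := experience.reverse.foldl (fun (s : Int × Int) e =>
    (s.1 - e, max (e + 1 - (s.1 - e)) s.2)) (total, 0)
  max 0 (1 + energy.foldl (· + ·) 0 - initialEnergy) + st.2

-- ===== PRECONDITION & SPEC =====
def Spec_minNumberOfHours (initialEnergy : Int) (initialExperience : Int) (energy : List Int) (experience : List Int) (out : Int) : Prop := out = minNumberOfHours_alt initialEnergy initialExperience energy experience
instance (initialEnergy : Int) (initialExperience : Int) (energy : List Int) (experience : List Int) (out : Int) : Decidable (Spec_minNumberOfHours initialEnergy initialExperience energy experience out) := by unfold Spec_minNumberOfHours; infer_instance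

-- ===== CLAIM (what is proved, stated in full; the proofs are below) =====
def Claim_equal_minNumberOfHours : Prop := ∀ (initialEnergy : Int) (initialExperience : Int) (energy : List Int) (experience : List Int), Dom_minNumberOfHours initialEnergy initialExperience energy experience → Spec_minNumberOfHours initialEnergy initialExperience energy experience (minNumberOfHours initialEnergy initialExperience energy experience)

-- ===== LEMMAS AND PROOFS =====

-- Reference function: the maximum deficit max_i (e_i + 1 - prefix_i), floored at 0.
def mDef (p : Int) : List Int → Int
  | [] => 0
  | e :: t => max (e + 1 - p) (mDef (p + e) t)

theorem mDef_nonneg (l : List Int) (p : Int) : 0 ≤ mDef p l := by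
  induction l generalizing p with
  | nil => simp [mDef]
  | cons e t ih => exact le_trans (ih (p + e)) (le_max_right _ _)

-- A's loop: starting from (p + b, b) with 0 ≤ b, the accumulated top-up is max b (mDef p l).
theorem loopA_eq (l : List Int) (p b : Int) (hb : 0 ≤ b) :
    (l.foldl (fun (s : Int × Int) e =>
      if s.1 > e then (s.1 + e, s.2)
      else
        let add := e - s.1 + 1
        (s.1 + add + e, s.2 + add)) (p + b, b)).2 = max b (mDef p l) := by
  induction l generalizing p b with
  | nil => simp [mDef]; omega
  | cons e t ih =>
    simp only [List.foldl_cons, mDef]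
    by_cases h : p + b > e
    · rw [if_pos h]
      have h1 : p + b + e = (p + e) + b := by ring
      rw [h1, ih (p + e) b hb]
      omega
    · rw [if_neg h]
      have h1 : p + b + (e - (p + b) + 1) + e = (p + e) + (e + 1 - p) := by ring
      have h2 : b + (e - (p + b) + 1) = e + 1 - p := by ring
      rw [h1, h2, ih (p + e) (e + 1 - p) (by omega)]
      omega

-- B's reverse loop, seen as a foldr: starting from the total p + sum l, it returns (p, mDef p l).
theorem loopB_eq (l : List Int) (p : Int) :
    l.foldr (fun e (s : Int × Int) => (s.1 - e, max (e + 1 - (s.1 - e)) s.2))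
      (p + l.foldl (· + ·) 0, 0) = (p, mDef p l) := by
  induction l generalizing p with
  | nil => simp [mDef]
  | cons e t ih =>
    have hshift : ∀ (l : List Int) (a : Int), l.foldl (· + ·) a = a + l.foldl (· + ·) 0 := by
      intro l
      induction l with
      | nil => intro a; simp
      | cons x xs ihx => intro a; simp only [List.foldl_cons]; rw [ihx (a + x), ihx (0 + x)]; ring
    have hsum : p + (e :: t).foldl (· + ·) 0 = (p + e) + t.foldl (· + ·) 0 := by
      simp only [List.foldl_cons]; rw [hshift t (0 + e)]; ring
    simp only [List.foldr_cons, hsum, ih (p + e), mDef]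
    simp

theorem minNumberOfHours_spec : Claim_equal_minNumberOfHours := by
  intro iE iX energy experience _
  unfold Spec_minNumberOfHours minNumberOfHours minNumberOfHours_alt
  simp only []
  rw [List.foldl_reverse]
  have hB := loopB_eq experience iX
  have hA := loopA_eq experience iX 0 le_rfl
  simp only [add_zero] at hA
  rw [hA]
  rw [show experience.foldr (fun e (s : Int × Int) => (s.1 - e, max (e + 1 - (s.1 - e)) s.2))
      (iX + experience.foldl (· + ·) 0, 0) = (iX, mDef iX experience) from hB]
  have := mDef_nonneg experience iX
  omega
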